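-- pv_equiv track=rewrite | github.com/amogchandrashekar/Leetcode | Medium/Find the Minimum Number of Fibonacci Numbers Whose Sum Is K.py | findMinFibonacciNumbers
-- ===== SOURCE A (Python) =====
-- from bisect import bisect
--
-- def findMinFibonacciNumbers(k: int) -> int:
--     fibonacci = [1, 1]
--     sum = 1
--     """
--     generate fibonacci numbers until the last number is less than k, as the sum of n numbers should be
--     less than the number given.
--     """
--     while k > sum:
--         sum = fibonacci[-1] + fibonacci[-2]
--         fibonacci.append(sum)
--
--     counter = 0
--     while k > 0:
--         """
--         bisect gives where the value has to be inserted in the list, we use -1 of the position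
--         ie, we subtract the biggest number in fibonacci to minimise the counter. (greedy method)
--         """
--         index = bisect(fibonacci, k) - 1
--         k -= fibonacci[index]
--         counter += 1
--     return counter
-- ===== SOURCE B (Python) =====
-- def findMinFibonacciNumbers(k: int) -> int:
--     # Recursive, list-free: find the largest Fibonacci number not exceeding k
--     # by walking a pair upward, then recurse on the remainder.
--     if k <= 0:
--         return 0
--     a, b = 1, 1
--     while a + b <= k:
--         a, b = b, a + b
--     return 1 + findMinFibonacciNumbers(k - b)
-- ===== Notes on version B (the rewrite author's own statement) =====
-- stated objective: simpler
-- what changed: Eliminates the materialized Fibonacci list and the bisect binary search entirely: B is a short recursive function that per step walks a pair (a,b) upward to the largest Fibonacci number not exceeding k and recurses on the remainder, instead of A's two staged passes (build the whole list, then repeatedly binary-search it).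
import Mathlib
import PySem

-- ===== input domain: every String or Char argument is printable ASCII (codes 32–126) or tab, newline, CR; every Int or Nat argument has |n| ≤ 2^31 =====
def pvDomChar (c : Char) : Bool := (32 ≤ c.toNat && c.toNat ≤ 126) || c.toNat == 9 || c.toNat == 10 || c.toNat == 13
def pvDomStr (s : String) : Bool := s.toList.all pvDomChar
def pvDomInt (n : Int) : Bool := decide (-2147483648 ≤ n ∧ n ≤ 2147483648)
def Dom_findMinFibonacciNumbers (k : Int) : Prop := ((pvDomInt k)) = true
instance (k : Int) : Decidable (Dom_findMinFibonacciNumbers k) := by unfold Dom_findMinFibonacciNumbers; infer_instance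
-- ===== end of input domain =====

-- B removes A's Fibonacci list and bisect search: a list-free recursion that walks a
-- pair up to the largest Fibonacci ≤ k and recurses on the remainder (objective: simpler).

-- ===== PORT A =====
-- while k > sum: sum = fib[-1] + fib[-2]; fib.append(sum)   (fuel bounds the loop; k.toNat+2 always suffices since sum grows by ≥1 each step)
def fibGenA (k : Int) : Nat → List Int → Int → List Int
  | 0, fibs, _ => fibs
  | n + 1, fibs, sum =>
      if k > sum then
        let s := PySem.List.pyGetD fibs (-1) 0 + PySem.List.pyGetD fibs (-2) 0
        fibGenA k n (fibs ++ [s]) s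
      else fibs

-- while k > 0: index = bisect(fib, k) - 1; k -= fib[index]; counter += 1
-- bisect (a C stdlib binary search) is ported by its value on the sorted list: the number of elements ≤ k.
def greedyA (fibs : List Int) : Nat → Int → Int → Int
  | 0, _, counter => counter
  | n + 1, k, counter =>
      if k > 0 then
        let index : Int := (fibs.countP (fun x => decide (x ≤ k)) : Int) - 1
        greedyA fibs n (k - PySem.List.pyGetD fibs index 0) (counter + 1)
      else counter

def findMinFibonacciNumbers (k : Int) : Int :=
  let fibs := fibGenA k (k.toNat + 2) [1, 1] 1
  greedyA fibs k.toNat k 0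

-- ===== PORT B =====
-- a, b = 1, 1; while a + b <= k: a, b = b, a + b   (fuel bounds the loop; k.toNat suffices since b grows by ≥1 each step)
def largestFibLE (k : Int) : Nat → Int → Int → Int
  | 0, _, b => b
  | n + 1, a, b => if a + b ≤ k then largestFibLE k n b (a + b) else b

-- the walk's result stays ≥ 1: needed by the port's termination argument
theorem largestFibLE_ge_one (k : Int) : ∀ (fuel : Nat) (a b : Int), 0 ≤ a → 1 ≤ b →
    1 ≤ largestFibLE k fuel a b := by
  intro fuel
  induction fuel with
  | zero => intro a b _ hb; exact hb
  | succ n ih =>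
      intro a b ha hb
      simp only [largestFibLE]
      split_ifs with h
      · exact ih b (a + b) (by omega) (by omega)
      · exact hb

-- if k <= 0: return 0; else return 1 + findMinFibonacciNumbers(k - b)
def findMinFibonacciNumbers_alt (k : Int) : Int :=
  if h : k ≤ 0 then 0
  else 1 + findMinFibonacciNumbers_alt (k - largestFibLE k k.toNat 1 1)
termination_by k.toNat
decreasing_by
  have hb := largestFibLE_ge_one k k.toNat 1 1 (by norm_num) (by norm_num)
  omega

-- ===== PRECONDITION & SPEC =====
def Spec_findMinFibonacciNumbers (k : Int) (out : Int) : Prop := out = findMinFibonacciNumbers_alt k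
instance (k : Int) (out : Int) : Decidable (Spec_findMinFibonacciNumbers k out) := by unfold Spec_findMinFibonacciNumbers; infer_instance

-- ===== CLAIM (what is proved, stated in full; the proofs are below) =====
def Claim_equal_findMinFibonacciNumbers : Prop := ∀ (k : Int), Dom_findMinFibonacciNumbers k → Spec_findMinFibonacciNumbers k (findMinFibonacciNumbers k)

-- ===== LEMMAS AND PROOFS =====

-- the generated Fibonacci list, seen in reverse (largest first)
inductive RevFib : List Int → Prop
  | base : RevFib [1, 1]
  | step (a b : Int) (t : List Int) : RevFib (b :: a :: t) → RevFib ((a + b) :: b :: a :: t)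

theorem revfib_pos {R : List Int} (h : RevFib R) : ∀ e ∈ R, 1 ≤ e := by
  induction h with
  | base => intro e he; simp at he; omega
  | step a b t _ ih =>
      intro e he
      have ha : (1:Int) ≤ a := ih a (by simp)
      have hb : (1:Int) ≤ b := ih b (by simp)
      rcases List.mem_cons.mp he with rfl | he
      · omega
      · exact ih e he

theorem revfib_sorted {R : List Int} (h : RevFib R) : R.Pairwise (fun x y => y ≤ x) := by
  induction h with
  | base => simp
  | step a b t h ih =>
      have ha : (1:Int) ≤ a := revfib_pos h a (by simp)
      refine List.Pairwise.cons ?_ ih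
      intro e he
      rcases List.pairwise_cons.mp ih with ⟨hb, _⟩
      rcases List.mem_cons.mp he with rfl | he
      · omega
      · have := hb e he; omega

-- Zeckendorf decomposition step: the first element ≤ k in the descending list satisfies k < 2f
theorem revfib_split {R : List Int} (h : RevFib R) (k : Int) (hk : 0 < k) (hhd : k ≤ R.head!) :
    ∃ pre f suf, R = pre ++ f :: suf ∧ (∀ e ∈ pre, k < e) ∧ f ≤ k ∧ k < 2 * f ∧
      (∀ e ∈ suf, e ≤ f) ∧ f ≤ R.head! := by
  induction h with
  | base =>
      refine ⟨[], 1, [1], rfl, by simp, ?_, ?_, by simp, by simp [List.head!]⟩ <;>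
        simp [List.head!] at hhd ⊢ <;> omega
  | step a b t h ih =>
      have ha : (1:Int) ≤ a := revfib_pos h a (by simp)
      have hb : (1:Int) ≤ b := revfib_pos h b (by simp)
      have hab : a ≤ b := by
        rcases List.pairwise_cons.mp (revfib_sorted h) with ⟨hle, _⟩
        exact hle a (by simp)
      simp only [List.head!] at hhd ⊢
      by_cases h1 : a + b ≤ k
      · refine ⟨[], a + b, b :: a :: t, rfl, by simp, h1, by omega, ?_, by simp⟩
        intro e he
        rcases List.pairwise_cons.mp (revfib_sorted h) with ⟨hle, _⟩
        rcases List.mem_cons.mp he with rfl | he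
        · omega
        · have := hle e he; omega
      · by_cases h2 : b ≤ k
        · refine ⟨[a + b], b, a :: t, rfl, by simp; omega, h2, by omega, ?_, by omega⟩
          intro e he
          rcases List.pairwise_cons.mp (revfib_sorted h) with ⟨hle, _⟩
          exact hle e he
        · rcases ih (by simp [List.head!]; omega) with ⟨pre, f, suf, hR, hpre, hfk, h2f, hsuf, hfh⟩
          refine ⟨(a + b) :: pre, f, suf, by rw [List.cons_append, ← hR], ?_, hfk, h2f, hsuf, ?_⟩
          · intro e he
            rcases List.mem_cons.mp he with rfl | he
            · omega
            · exact hpre e he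
          · simp [List.head!] at hfh; omega

-- the bisect step of A picks exactly the first element ≤ k of the descending list
theorem pick_eq (pre suf : List Int) (f k : Int)
    (hpre : ∀ e ∈ pre, k < e) (hfk : f ≤ k) (hsuf : ∀ e ∈ suf, e ≤ f) :
    (((pre ++ f :: suf).reverse.countP (fun x => decide (x ≤ k)) : Int) - 1 = (suf.length : Int)) ∧
      PySem.List.pyGetD (pre ++ f :: suf).reverse ((suf.length : Int)) 0 = f := by
  have hL : (pre ++ f :: suf).reverse = suf.reverse ++ f :: pre.reverse := by
    simp
  constructor
  · rw [hL, List.countP_append]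
    have h1 : suf.reverse.countP (fun x => decide (x ≤ k)) = suf.reverse.length := by
      rw [List.countP_eq_length]
      intro e he
      have : e ∈ suf := List.mem_reverse.mp he
      simp only [decide_eq_true_eq]
      have := hsuf e this; omega
    have h2 : (f :: pre.reverse).countP (fun x => decide (x ≤ k)) = 1 := by
      simp only [List.countP_cons, decide_eq_true_eq]
      have h0 : pre.reverse.countP (fun x => decide (x ≤ k)) = 0 := by
        rw [List.countP_eq_zero]
        intro e he
        have := hpre e (List.mem_reverse.mp he)
        simp only [decide_eq_true_eq]; omega
      rw [h0, if_pos hfk]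
    rw [h1, h2]
    simp
  · rw [hL, PySem.List.pyGetD_natCast]
    simp

-- A's greedy loop returns the counter unchanged once k ≤ 0
theorem greedy_nonpos (L : List Int) (fuel : Nat) (k c : Int) (hk : k ≤ 0) :
    greedyA L fuel k c = c := by
  cases fuel with
  | zero => rfl
  | succ n => simp only [greedyA, if_neg (by omega : ¬ k > 0)]

-- the generation loop of A terminates within the fuel and yields a RevFib list topped by some b2 ≥ k
theorem genSpecA (k : Int) : ∀ (fuel : Nat) (a b : Int) (t : List Int),
    RevFib (b :: a :: t) → (k - b).toNat < fuel →
    ∃ b2 a2 t2, fibGenA k fuel (b :: a :: t).reverse b = (b2 :: a2 :: t2).reverse ∧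
      RevFib (b2 :: a2 :: t2) ∧ k ≤ b2 := by
  intro fuel
  induction fuel with
  | zero => intro a b t _ hf; omega
  | succ n ih =>
      intro a b t hR hf
      simp only [fibGenA]
      by_cases h : k > b
      · rw [if_pos h]
        have ha : (1:Int) ≤ a := revfib_pos hR a (by simp)
        have e1 : PySem.List.pyGetD (b :: a :: t).reverse (-1) 0 = b := by
          rw [show (b :: a :: t).reverse = (t.reverse ++ [a]) ++ [b] by simp]
          exact PySem.List.pyGetD_neg_one_append_singleton _ _ _
        have e2 : PySem.List.pyGetD (b :: a :: t).reverse (-2) 0 = a := by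
          rw [PySem.List.pyGetD_neg_ofNat (b :: a :: t).reverse 2 0 (by omega) (by simp)]
          simp
        rw [e1, e2]
        have hstep : RevFib ((a + b) :: b :: a :: t) := RevFib.step a b t hR
        have hrev : (b :: a :: t).reverse ++ [b + a] = ((a + b) :: b :: a :: t).reverse := by
          simp [show b + a = a + b by ring]
        rw [hrev, show b + a = a + b by ring]
        exact ih b (a + b) (a :: t) hstep (by omega)
      · rw [if_neg h]
        exact ⟨b, a, t, rfl, hR, by omega⟩

-- B's pair walk is fuel-irrelevant once the fuel dominates k - b
theorem lf_fuel (k : Int) : ∀ (f1 : Nat), ∀ (f2 : Nat) (a b : Int), 1 ≤ a → 1 ≤ b →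
    (k - b).toNat < f1 → (k - b).toNat < f2 →
    largestFibLE k f1 a b = largestFibLE k f2 a b := by
  intro f1
  induction f1 with
  | zero => intro f2 a b _ _ h1 _; omega
  | succ n ih =>
      intro f2 a b ha hb h1 h2
      cases f2 with
      | zero => omega
      | succ m =>
          simp only [largestFibLE]
          by_cases h : a + b ≤ k
          · rw [if_pos h, if_pos h]
            exact ih m b (a + b) hb (by omega) (by omega) (by omega)
          · rw [if_neg h, if_neg h]

-- canonical-fuel version of the walk, for the proofs
def LFc (k a b : Int) : Int := largestFibLE k ((k - b).toNat + 1) a b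

theorem LFc_step (k a b : Int) (ha : 1 ≤ a) (hb : 1 ≤ b) :
    LFc k a b = if a + b ≤ k then LFc k b (a + b) else b := by
  unfold LFc
  simp only [largestFibLE]
  by_cases h : a + b ≤ k
  · rw [if_pos h, if_pos h]
    exact lf_fuel k ((k - b).toNat) ((k - (a + b)).toNat + 1) b (a + b) hb (by omega) (by omega) (by omega)
  · rw [if_neg h, if_neg h]

-- the walk from (1,1) reaches any adjacent pair (a,b) of the chain with b ≤ k
theorem lf_reach (k : Int) : ∀ {R : List Int}, RevFib R → ∀ {a b : Int} {t : List Int},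
    R = b :: a :: t → b ≤ k → LFc k 1 1 = LFc k a b := by
  intro R h
  induction h with
  | base =>
      intro a b t hEq _
      injection hEq with h1 h2; injection h2 with h3 _
      subst h1; subst h3; rfl
  | step a' b' t' h ih =>
      intro a b t hEq hbk
      injection hEq with h1 h2; injection h2 with h3 h4
      subst h1; subst h3; subst h4
      have ha' : (1:Int) ≤ a' := revfib_pos h a' (by simp)
      have hb' : (1:Int) ≤ b' := revfib_pos h b' (by simp)
      have hib : b' ≤ k := by omega
      rw [ih rfl hib, LFc_step k a' b' ha' hb', if_pos hbk]

-- the walk computes the maximal element ≤ k of the chain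
theorem lf_max {R : List Int} (h : RevFib R) (k : Int) (hk : 0 < k) (hhd : k ≤ R.head!) :
    ∃ f, LFc k 1 1 = f ∧ f ∈ R ∧ f ≤ k ∧ ∀ e ∈ R, e ≤ k → e ≤ f := by
  induction h with
  | base =>
      simp only [List.head!] at hhd
      refine ⟨1, ?_, by simp, by omega, ?_⟩
      · rw [LFc_step k 1 1 (by norm_num) (by norm_num), if_neg (by omega)]
      · intro e he _; simp at he; omega
  | step a b t h ih =>
      have ha : (1:Int) ≤ a := revfib_pos h a (by simp)
      have hb : (1:Int) ≤ b := revfib_pos h b (by simp)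
      simp only [List.head!] at hhd
      by_cases hkb : k ≤ b
      · rcases ih (by simp [List.head!]; omega) with ⟨f, hf1, hf2, hf3, hf4⟩
        refine ⟨f, hf1, by simp [hf2], hf3, ?_⟩
        intro e he hek
        rcases List.mem_cons.mp he with rfl | he
        · omega
        · exact hf4 e he hek
      · have hreach : LFc k 1 1 = LFc k a b := lf_reach k h rfl (by omega)
        rcases List.pairwise_cons.mp (revfib_sorted (RevFib.step a b t h)) with ⟨hle, _⟩
        by_cases hs : a + b ≤ k
        · have hk2 : k = a + b := by omega
          refine ⟨a + b, ?_, by simp, by omega, ?_⟩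
          · rw [hreach, LFc_step k a b ha hb, if_pos hs,
                LFc_step k b (a + b) hb (by omega), if_neg (by omega)]
          · intro e he _
            rcases List.mem_cons.mp he with rfl | he
            · omega
            · have := hle e he; omega
        · refine ⟨b, ?_, by simp, by omega, ?_⟩
          · rw [hreach, LFc_step k a b ha hb, if_neg hs]
          · intro e he hek
            rcases List.mem_cons.mp he with rfl | he
            · omega
            · rcases List.pairwise_cons.mp (revfib_sorted h) with ⟨hle2, _⟩
              rcases List.mem_cons.mp he with rfl | he
              · omega
              · have := hle2 e he; omega

-- B's recursion on a nonpositive argument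
theorem alt_nonpos (k : Int) (hk : k ≤ 0) : findMinFibonacciNumbers_alt k = 0 := by
  rw [findMinFibonacciNumbers_alt, dif_pos hk]

-- main loop equivalence: A's greedy loop over the list equals B's recursion
theorem greedy_rec : ∀ (fuelA : Nat) (R : List Int) (k c : Int), RevFib R → 0 < k →
    k ≤ R.head! → k.toNat ≤ fuelA →
    greedyA R.reverse fuelA k c = c + findMinFibonacciNumbers_alt k := by
  intro fuelA
  induction fuelA with
  | zero => intro R k c _ hk _ hf; omega
  | succ n ih =>
      intro R k c hR hk hhd hf
      rcases revfib_split hR k hk hhd with ⟨pre, f, suf, hRe, hpre, hfk, h2f, hsuf, hfh⟩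
      have hfpos : (1:Int) ≤ f := revfib_pos hR f (by rw [hRe]; simp)
      simp only [greedyA, if_pos hk]
      rw [hRe]
      rcases pick_eq pre suf f k hpre hfk hsuf with ⟨hidx, hget⟩
      rw [hidx, hget, ← hRe]
      -- B's first step subtracts the same f
      have hlf : largestFibLE k k.toNat 1 1 = f := by
        have h1 : largestFibLE k k.toNat 1 1 = LFc k 1 1 := by
          unfold LFc
          exact lf_fuel k k.toNat ((k - 1).toNat + 1) 1 1 (by norm_num) (by norm_num)
            (by omega) (by omega)
        rcases lf_max hR k hk hhd with ⟨fB, hB1, hB2, hB3, hB4⟩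
        have hle1 : f ≤ fB := hB4 f (by rw [hRe]; simp) hfk
        have hle2 : fB ≤ f := by
          rw [hRe] at hB2
          rcases List.mem_append.mp hB2 with hm | hm
          · have := hpre fB hm; omega
          · rcases List.mem_cons.mp hm with rfl | hm
            · omega
            · exact hsuf fB hm
        rw [h1, hB1]; omega
      have hAlt : findMinFibonacciNumbers_alt k = 1 + findMinFibonacciNumbers_alt (k - f) := by
        rw [findMinFibonacciNumbers_alt, dif_neg (by omega : ¬ k ≤ 0), hlf]
      rw [hAlt]
      by_cases hz : k - f ≤ 0
      · rw [greedy_nonpos _ n _ (c + 1) hz, alt_nonpos (k - f) hz]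
        ring
      · rw [ih R (k - f) (c + 1) hR (by omega) (by omega) (by omega)]
        ring

-- ===== VERDICT (by name: the statement is the Claim_ definition above) =====
theorem findMinFibonacciNumbers_spec : Claim_equal_findMinFibonacciNumbers := by
  unfold Claim_equal_findMinFibonacciNumbers
  intro k _
  unfold Spec_findMinFibonacciNumbers findMinFibonacciNumbers
  by_cases hk : 0 < k
  · rcases genSpecA k (k.toNat + 2) 1 1 [] RevFib.base (by omega) with ⟨b2, a2, t2, hgen, hRF, hkb⟩
    have hgen' : fibGenA k (k.toNat + 2) [1, 1] 1 = (b2 :: a2 :: t2).reverse := by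
      simpa using hgen
    rw [hgen', greedy_rec k.toNat (b2 :: a2 :: t2) k 0 hRF hk (by simp [List.head!]; omega) (le_refl _)]
    ring
  · rw [show k.toNat = 0 by omega]
    simp only [greedyA]
    rw [alt_nonpos k (by omega)]
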